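-- pv_equiv track=rewrite | github.com/alboismoreau/AED1 | resoluciones/guia7-24.py | tres_vocales_distintas
-- ===== SOURCE A (Python) =====
-- def tres_vocales_distintas(palabra:str) -> bool:
--     tieneA:int = 0
--     tieneE:int = 0
--     tieneI:int = 0
--     tieneO:int = 0
--     tieneU:int = 0
--     for letra in palabra:
--         if letra == 'a' or letra == 'A':
--             tieneA = 1
--         if letra == 'e' or letra == 'E':
--             tieneE = 1
--         if letra == 'i' or letra == 'I':
--             tieneI = 1
--         if letra == 'o' or letra == 'O':
--             tieneO = 1
--         if letra == 'u' or letra == 'U':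
--             tieneU = 1
--     return tieneU + tieneO + tieneI + tieneE + tieneA >= 3
-- ===== SOURCE B (Python) =====
-- def tres_vocales_distintas(palabra: str) -> bool:
--     low = palabra.lower()
--     return sum(1 for v in "aeiou" if v in low) >= 3
-- ===== Notes on version B (the rewrite author's own statement) =====
-- stated objective: idiomatic
-- what changed: Replaces the five per-character boolean flag accumulators with lower-casing the word once and counting, over the five vowels, which occur in it.
import Mathlib
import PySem

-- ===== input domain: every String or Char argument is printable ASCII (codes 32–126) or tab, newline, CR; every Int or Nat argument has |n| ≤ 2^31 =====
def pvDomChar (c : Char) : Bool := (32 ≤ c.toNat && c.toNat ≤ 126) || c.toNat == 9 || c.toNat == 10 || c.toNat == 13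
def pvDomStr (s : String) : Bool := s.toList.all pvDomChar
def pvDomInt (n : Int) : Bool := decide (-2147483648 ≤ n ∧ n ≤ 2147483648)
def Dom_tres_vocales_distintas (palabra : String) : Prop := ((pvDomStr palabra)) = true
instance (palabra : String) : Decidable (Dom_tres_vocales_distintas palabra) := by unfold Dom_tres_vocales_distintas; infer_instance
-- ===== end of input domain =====

-- B lower-cases the word once and counts which of the five vowels occur in it,
-- instead of A's five per-character flag accumulators. Same O(n) cost.

-- ===== PORT A =====
def tres_vocales_distintas (palabra : String) : Bool :=
  let st := palabra.toList.foldl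
    (fun (st : Int × Int × Int × Int × Int) letra =>
      let a := if letra = 'a' ∨ letra = 'A' then (1 : Int) else st.1
      let e := if letra = 'e' ∨ letra = 'E' then (1 : Int) else st.2.1
      let i := if letra = 'i' ∨ letra = 'I' then (1 : Int) else st.2.2.1
      let o := if letra = 'o' ∨ letra = 'O' then (1 : Int) else st.2.2.2.1
      let u := if letra = 'u' ∨ letra = 'U' then (1 : Int) else st.2.2.2.2
      (a, e, i, o, u))
    (0, 0, 0, 0, 0)
  decide (st.2.2.2.2 + st.2.2.2.1 + st.2.2.1 + st.2.1 + st.1 ≥ 3)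

-- ===== PORT B =====
def tres_vocales_distintas_alt (palabra : String) : Bool :=
  let low := PySem.Chars.lower palabra.toList
  decide ((['a', 'e', 'i', 'o', 'u'].foldl
    (fun (acc : Int) v => if low.contains v then acc + 1 else acc) 0) ≥ 3)

-- ===== PRECONDITION & SPEC =====
def Spec_tres_vocales_distintas (palabra : String) (out : Bool) : Prop := out = tres_vocales_distintas_alt palabra
instance (palabra : String) (out : Bool) : Decidable (Spec_tres_vocales_distintas palabra out) := by unfold Spec_tres_vocales_distintas; infer_instance

-- ===== CLAIM (what is proved, stated in full; the proofs are below) =====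
def Claim_equal_tres_vocales_distintas : Prop := ∀ (palabra : String), Dom_tres_vocales_distintas palabra → Spec_tres_vocales_distintas palabra (tres_vocales_distintas palabra)

-- ===== LEMMAS AND PROOFS =====

/-- The value a flag of A's loop has after scanning `l`, starting from `x`. -/
def vflag (c1 c2 : Char) (l : List Char) (x : Int) : Int :=
  if l.any (fun c => c == c1 || c == c2) then 1 else x

theorem vflag_cons (c1 c2 c : Char) (l : List Char) (x : Int) :
    vflag c1 c2 (c :: l) x = vflag c1 c2 l (if c = c1 ∨ c = c2 then 1 else x) := by
  simp only [vflag, List.any_cons]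
  split_ifs <;> simp_all

theorem foldA (l : List Char) (a e i o u : Int) :
    l.foldl
      (fun (st : Int × Int × Int × Int × Int) letra =>
        let a := if letra = 'a' ∨ letra = 'A' then (1 : Int) else st.1
        let e := if letra = 'e' ∨ letra = 'E' then (1 : Int) else st.2.1
        let i := if letra = 'i' ∨ letra = 'I' then (1 : Int) else st.2.2.1
        let o := if letra = 'o' ∨ letra = 'O' then (1 : Int) else st.2.2.2.1
        let u := if letra = 'u' ∨ letra = 'U' then (1 : Int) else st.2.2.2.2
        (a, e, i, o, u))
      (a, e, i, o, u)
    = (vflag 'a' 'A' l a, vflag 'e' 'E' l e, vflag 'i' 'I' l i,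
       vflag 'o' 'O' l o, vflag 'u' 'U' l u) := by
  induction l generalizing a e i o u with
  | nil => simp [vflag]
  | cons c l ih =>
      simp only [List.foldl_cons, ih, vflag_cons]

theorem isupper_iff (c : Char) : PySem.Chars.isupper c = true ↔ 65 ≤ c.toNat ∧ c.toNat ≤ 90 := by
  have h1 : ('A' : Char).val.toNat = 65 := rfl
  have h2 : ('Z' : Char).val.toNat = 90 := rfl
  have h3 : c.toNat = c.val.toNat := rfl
  simp only [PySem.Chars.isupper, Bool.and_eq_true, decide_eq_true_eq, Char.le_def,
    UInt32.le_iff_toNat_le, h1, h2, h3]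

theorem char_ext' (a b : Char) (h : a.toNat = b.toNat) : a = b := by
  apply Char.ext; exact UInt32.toNat_inj.mp h

theorem ofNat_toNat (n : Nat) (h : Nat.isValidChar n) : (Char.ofNat n).toNat = n := by
  simp [Char.ofNat, h]

theorem lowerChar_eq_iff (c lo up : Char) (h1 : 97 ≤ lo.toNat) (h2 : lo.toNat ≤ 122)
    (h3 : up.toNat + 32 = lo.toNat) :
    PySem.Chars.lowerChar c = lo ↔ (c = lo ∨ c = up) := by
  simp only [PySem.Chars.lowerChar]
  split_ifs with h
  · have hb := (isupper_iff c).mp h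
    have hvalid : Nat.isValidChar (c.toNat + 32) := Or.inl (by omega)
    have htn : (Char.ofNat (c.toNat + 32)).toNat = c.toNat + 32 := ofNat_toNat _ hvalid
    constructor
    · intro he
      have h4 : c.toNat + 32 = lo.toNat := by rw [← htn, he]
      exact Or.inr (char_ext' _ _ (by omega))
    · rintro (h' | h')
      · exfalso
        have : c.toNat = lo.toNat := by rw [h']
        omega
      · have : c.toNat = up.toNat := by rw [h']
        exact char_ext' _ _ (by omega)
  · constructor
    · exact Or.inl
    · rintro (h' | h')
      · exact h'
      · exfalso
        have hc : c.toNat = up.toNat := by rw [h']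
        exact h ((isupper_iff c).mpr ⟨by omega, by omega⟩)

theorem contains_lower_iff (l : List Char) (lo up : Char) (h1 : 97 ≤ lo.toNat)
    (h2 : lo.toNat ≤ 122) (h3 : up.toNat + 32 = lo.toNat) :
    (PySem.Chars.lower l).contains lo = l.any (fun c => c == lo || c == up) := by
  have hmap : PySem.Chars.lower l = l.map PySem.Chars.lowerChar := rfl
  rw [hmap, Bool.eq_iff_iff]
  simp only [List.contains_eq_any_beq, List.any_map, List.any_eq_true, Function.comp,
    beq_iff_eq, Bool.or_eq_true]
  constructor
  · rintro ⟨c, hc, he⟩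
    exact ⟨c, hc, (lowerChar_eq_iff c lo up h1 h2 h3).mp he.symm⟩
  · rintro ⟨c, hc, he⟩
    exact ⟨c, hc, ((lowerChar_eq_iff c lo up h1 h2 h3).mpr he).symm⟩

-- ===== VERDICT (by name: the statement is the Claim_ definition above) =====
theorem tres_vocales_distintas_spec : Claim_equal_tres_vocales_distintas := by
  intro palabra _
  show tres_vocales_distintas palabra = tres_vocales_distintas_alt palabra
  unfold tres_vocales_distintas tres_vocales_distintas_alt
  rw [foldA]
  simp only [List.foldl_cons, List.foldl_nil]
  simp only [contains_lower_iff _ 'a' 'A' (by decide) (by decide) (by decide),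
    contains_lower_iff _ 'e' 'E' (by decide) (by decide) (by decide),
    contains_lower_iff _ 'i' 'I' (by decide) (by decide) (by decide),
    contains_lower_iff _ 'o' 'O' (by decide) (by decide) (by decide),
    contains_lower_iff _ 'u' 'U' (by decide) (by decide) (by decide), vflag]
  by_cases ha : (palabra.toList.any fun c => c == 'a' || c == 'A') = true <;>
  by_cases he : (palabra.toList.any fun c => c == 'e' || c == 'E') = true <;>
  by_cases hi : (palabra.toList.any fun c => c == 'i' || c == 'I') = true <;>
  by_cases ho : (palabra.toList.any fun c => c == 'o' || c == 'O') = true <;>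
  by_cases hu : (palabra.toList.any fun c => c == 'u' || c == 'U') = true <;>
  simp [ha, he, hi, ho, hu]
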